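-- pv_equiv track=rewrite | github.com/postvakje/oeis-sequences | oeis-sequences/OEISsequences.py | A321440
-- ===== SOURCE A (Python) =====
-- def A321440(n):
--     if n == 0:
--         return 1
--     c = 0
--     for i in range(n):
--         mi = i * (i + 1) // 2 + n
--         for j in range(i + 1, n + 1):
--             k = mi - j * (j + 1) // 2
--             if k < 0:
--                 break
--             if not k % j:
--                 c += 1
--     return c
-- ===== SOURCE B (Python) =====
-- def A321440(n):
--     # j-major loop interchange: for each candidate divisor j, count the i < j
--     # whose triangular number T(i) reaches T(j) - n (window maintained by a
--     # two-pointer lower bound 'lo') and for which j divides T(i) + n - T(j).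
--     if n == 0:
--         return 1
--     c = 0
--     lo = 0
--     for j in range(1, n + 1):
--         t = j * (j + 1) // 2 - n
--         while lo * (lo + 1) // 2 < t:
--             lo += 1
--         for i in range(lo, j):
--             if (i * (i + 1) // 2 + n - j * (j + 1) // 2) % j == 0:
--                 c += 1
--     return c
-- ===== Notes on version B (the rewrite author's own statement) =====
-- stated objective: alternative
-- what changed: A scans i-major, for each i walking j upward from the successor of i and breaking when k goes negative; B interchanges the loops to run j-major, maintaining the lower end of the feasible i-window (the least i whose triangular number reaches T(j)-n) by a persistent two-pointer sweep and counting the i in that window whose k is divisible by j.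
import Mathlib
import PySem

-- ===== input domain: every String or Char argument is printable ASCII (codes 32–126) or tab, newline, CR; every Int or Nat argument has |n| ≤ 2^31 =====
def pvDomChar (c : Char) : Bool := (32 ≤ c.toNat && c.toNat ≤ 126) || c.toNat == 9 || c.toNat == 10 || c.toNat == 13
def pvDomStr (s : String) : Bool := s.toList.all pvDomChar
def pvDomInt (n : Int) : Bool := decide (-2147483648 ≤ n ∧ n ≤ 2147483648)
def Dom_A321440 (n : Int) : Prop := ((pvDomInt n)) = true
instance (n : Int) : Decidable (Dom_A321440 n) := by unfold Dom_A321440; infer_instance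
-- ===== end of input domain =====

-- B replaces A's i-major scan (j upward from i+1 with an early break) by a
-- j-major loop that keeps the lower end of the feasible i-window with a
-- two-pointer sweep (objective: alternative algorithm, same exact count).

-- ===== PORT A =====
-- inner loop of A: 'for j in range(i+1, n+1): k = mi - T(j); if k < 0: break; if not k % j: c += 1'
-- (the lazy range with break is rendered as recursion on the index j, stopping at nn = n+1)
def A321440_inner (mi nn j c : Int) : Int :=
  if j < nn then
    let k := mi - PySem.Int.floordiv (j * (j + 1)) 2
    if k < 0 then c
    else if PySem.Int.mod k j == 0 then A321440_inner mi nn (j + 1) (c + 1)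
    else A321440_inner mi nn (j + 1) c
  else c
termination_by (nn - j).toNat

def A321440 (n : Int) : Int :=
  if n == 0 then 1
  else
    (PySem.List.pyRange 0 n 1).foldl
      (fun c i =>
        let mi := PySem.Int.floordiv (i * (i + 1)) 2 + n
        A321440_inner mi (n + 1) (i + 1) c) 0

-- ===== PORT B =====
-- termination helper for the 'while' below: lo ≤ lo*(lo+1)//2
theorem pvT_ge_self (x : Int) : x ≤ PySem.Int.floordiv (x * (x + 1)) 2 := by
  rw [PySem.Int.floordiv_eq_ediv_of_pos (by norm_num)]
  have h2 : 2 * (x * (x + 1) / 2) = x * (x + 1) :=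
    Int.mul_ediv_cancel' (Int.even_mul_succ_self x).two_dvd
  nlinarith [mul_self_nonneg (x - 1), mul_self_nonneg x]

-- B's 'while lo*(lo+1)//2 < t: lo += 1'
def A321440_adv (t lo : Int) : Int :=
  if PySem.Int.floordiv (lo * (lo + 1)) 2 < t then A321440_adv t (lo + 1) else lo
termination_by (t - lo).toNat
decreasing_by
  have := pvT_ge_self lo
  omega

def A321440_alt (n : Int) : Int :=
  if n == 0 then 1
  else
    ((PySem.List.pyRange 1 (n + 1) 1).foldl
      (fun (s : Int × Int) j =>
        let t := PySem.Int.floordiv (j * (j + 1)) 2 - n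
        let lo := A321440_adv t s.2
        let c := (PySem.List.pyRange lo j 1).foldl
          (fun c i =>
            if PySem.Int.mod (PySem.Int.floordiv (i * (i + 1)) 2 + n
                - PySem.Int.floordiv (j * (j + 1)) 2) j == 0
            then c + 1 else c) s.1
        (c, lo)) ((0 : Int), (0 : Int))).1

-- ===== PRECONDITION & SPEC =====
def Spec_A321440 (n : Int) (out : Int) : Prop := out = A321440_alt n
instance (n : Int) (out : Int) : Decidable (Spec_A321440 n out) := by unfold Spec_A321440; infer_instance

-- ===== CLAIM (what is proved, stated in full; the proofs are below) =====
def Claim_equal_A321440 : Prop := ∀ (n : Int), Dom_A321440 n → Spec_A321440 n (A321440 n)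

-- ===== LEMMAS AND PROOFS =====

-- T(x) = x*(x+1)//2 (abbrev: definitionally the ports' expression)
abbrev pvT (x : Int) : Int := PySem.Int.floordiv (x * (x + 1)) 2

theorem pvT_twice (x : Int) : 2 * pvT x = x * (x + 1) := by
  unfold pvT
  rw [PySem.Int.floordiv_eq_ediv_of_pos (by norm_num)]
  exact Int.mul_ediv_cancel' (Int.even_mul_succ_self x).two_dvd

theorem pvT_mono (x y : Int) (hx : 0 ≤ x) (hxy : x ≤ y) : pvT x ≤ pvT y := by
  have h1 := pvT_twice x
  have h2 := pvT_twice y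
  nlinarith [mul_nonneg (by omega : (0:ℤ) ≤ y - x) (by omega : (0:ℤ) ≤ y + x + 1)]

-- the pair condition both programs count: T(j) ≤ T(i)+n and j | (T(i)+n-T(j))
abbrev pvQ (n i j : Int) : Prop := pvT j ≤ pvT i + n ∧ j ∣ (pvT i + n - pvT j)

-- generic Finset counting helpers
theorem pvSplitIoc (P : Int → Prop) [DecidablePred P] (a n : Int) :
    ((Finset.Ioc (a - 1) n).filter P).card =
      (if P a ∧ a ≤ n then 1 else 0) + ((Finset.Ioc a n).filter P).card := by
  by_cases han : a ≤ n
  · have hins : Finset.Ioc (a - 1) n = insert a (Finset.Ioc a n) := by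
      ext x
      simp only [Finset.mem_Ioc, Finset.mem_insert]
      omega
    rw [hins, Finset.filter_insert]
    by_cases hp : P a
    · rw [if_pos hp, if_pos ⟨hp, han⟩,
          Finset.card_insert_of_notMem (fun hmem => by
            have := (Finset.mem_filter.mp hmem).1
            simp [Finset.mem_Ioc] at this)]
      omega
    · rw [if_neg hp, if_neg (fun h => hp h.1)]
      omega
  · have h1 : Finset.Ioc (a - 1) n = ∅ := Finset.Ioc_eq_empty (by omega)
    have h2 : Finset.Ioc a n = ∅ := Finset.Ioc_eq_empty (by omega)
    rw [h1, h2, if_neg (fun h => han h.2)]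
    simp

theorem pvZeroIoc (P : Int → Prop) [DecidablePred P] (a n : Int)
    (h : ∀ e, a - 1 < e → e ≤ n → ¬ P e) :
    ((Finset.Ioc (a - 1) n).filter P).card = 0 := by
  rw [Finset.card_eq_zero, Finset.filter_eq_empty_iff]
  intro x hx
  rw [Finset.mem_Ioc] at hx
  exact h x (by omega) (by omega)

theorem pvSumSplit (g : Int → Int) (a b : Int) (h : a < b) :
    (∑ x ∈ Finset.Ico a b, g x) = g a + ∑ x ∈ Finset.Ico (a + 1) b, g x := by
  have hins : Finset.Ico a b = insert a (Finset.Ico (a + 1) b) := by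
    ext x
    simp only [Finset.mem_Ico, Finset.mem_insert]
    omega
  rw [hins, Finset.sum_insert (fun hmem => by simp [Finset.mem_Ico] at hmem)]

-- generic: a fold that adds 1 when a Bool test passes is countP
theorem pvFoldCount (p : Int → Bool) : ∀ (l : List Int) (c : Int),
    l.foldl (fun c i => if p i then c + 1 else c) c = c + (l.countP p : Int)
  | [], c => by simp
  | x :: l, c => by
    simp only [List.foldl_cons, List.countP_cons]
    by_cases hp : p x
    · have h1 : (if p x then (1:Nat) else 0) = 1 := by simp [hp]
      rw [if_pos hp, pvFoldCount p l (c + 1), h1]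
      push_cast
      ring
    · have h1 : (if p x then (1:Nat) else 0) = 0 := by simp [hp]
      rw [if_neg hp, pvFoldCount p l c, h1]
      push_cast
      ring

-- countP over a Python range is the card of the filtered interval
theorem pvCountP_range (P : Int → Prop) [DecidablePred P] :
    ∀ (k : Nat) (a b : Int), (b - a).toNat ≤ k →
      (PySem.List.pyRange a b 1).countP (fun e => decide (P e)) =
        ((Finset.Ico a b).filter P).card := by
  intro k
  induction k with
  | zero =>
    intro a b hk
    rw [PySem.List.pyRange_one_eq_nil (by omega), Finset.Ico_eq_empty (by omega)]
    simp
  | succ k IH =>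
    intro a b hk
    by_cases hab : a < b
    · rw [PySem.List.pyRange_one_cons hab, List.countP_cons]
      have hins : Finset.Ico a b = insert a (Finset.Ico (a + 1) b) := by
        ext x
        simp only [Finset.mem_Ico, Finset.mem_insert]
        omega
      rw [hins, Finset.filter_insert, IH (a + 1) b (by omega)]
      by_cases hp : P a
      · rw [if_pos hp,
            Finset.card_insert_of_notMem (fun hmem => by
              have := (Finset.mem_filter.mp hmem).1
              simp [Finset.mem_Ico] at this),
            decide_eq_true hp, if_pos rfl]
      · rw [if_neg hp, decide_eq_false hp, if_neg (by simp : ¬ (false = true))]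
        omega
    · rw [PySem.List.pyRange_one_eq_nil (by omega), Finset.Ico_eq_empty (by omega)]
      simp

-- A-side: the inner loop with break counts pvQ on (a-1, n]
theorem pvInnerA (n i : Int) (hi : 0 ≤ i) :
    ∀ (k : Nat) (a c : Int), (n + 1 - a).toNat ≤ k → i < a →
      A321440_inner (pvT i + n) (n + 1) a c =
        c + (((Finset.Ioc (a - 1) n).filter (fun j => pvQ n i j)).card : Int) := by
  intro k
  induction k with
  | zero =>
    intro a c hk hia
    rw [A321440_inner, if_neg (by omega : ¬ a < n + 1),
        pvZeroIoc _ a n (fun e h1 h2 => by omega)]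
    ring
  | succ k IH =>
    intro a c hk hia
    by_cases hna : a < n + 1
    · rw [A321440_inner, if_pos hna]
      simp only []
      by_cases hneg : pvT i + n - pvT a < 0
      · rw [if_pos hneg, pvZeroIoc _ a n (fun e h1 h2 => ?_)]
        · ring
        · rintro ⟨hK, -⟩
          have hTa : pvT a ≤ pvT e := pvT_mono a e (by omega) (by omega)
          omega
      · rw [if_neg hneg]
        have hQ : pvQ n i a ↔
            (PySem.Int.mod (pvT i + n - pvT a) a == 0) = true := by
          rw [beq_iff_eq, PySem.Int.mod_eq_zero_iff_dvd]
          constructor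
          · rintro ⟨-, hD⟩; exact hD
          · intro hD; exact ⟨by omega, hD⟩
        rw [pvSplitIoc (fun j => pvQ n i j) a n]
        by_cases hdvd : (PySem.Int.mod (pvT i + n - pvT a) a == 0) = true
        · rw [if_pos hdvd, IH (a + 1) (c + 1) (by omega) (by omega),
              if_pos ⟨hQ.mpr hdvd, by omega⟩]
          have h2 : a + 1 - 1 = a := by ring
          rw [h2]
          push_cast
          ring
        · rw [if_neg hdvd, IH (a + 1) c (by omega) (by omega),
              if_neg (fun h => hdvd (hQ.mp h.1))]
          have h2 : a + 1 - 1 = a := by ring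
          rw [h2]
          push_cast
          ring
    · rw [A321440_inner, if_neg hna, pvZeroIoc _ a n (fun e h1 h2 => by omega)]
      ring

-- A-side: the outer loop is the sum of the per-i counts
theorem pvOuterA (n : Int) :
    ∀ (k : Nat) (a c : Int), (n - a).toNat ≤ k → 0 ≤ a →
      (PySem.List.pyRange a n 1).foldl
        (fun c i => A321440_inner (PySem.Int.floordiv (i * (i + 1)) 2 + n) (n + 1) (i + 1) c) c =
      c + ∑ i ∈ Finset.Ico a n, (((Finset.Ioc i n).filter (fun j => pvQ n i j)).card : Int) := by
  intro k
  induction k with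
  | zero =>
    intro a c hk ha
    rw [PySem.List.pyRange_one_eq_nil (by omega), Finset.Ico_eq_empty (by omega)]
    simp
  | succ k IH =>
    intro a c hk ha
    by_cases han : a < n
    · rw [PySem.List.pyRange_one_cons han, List.foldl_cons,
          pvSumSplit _ a n han]
      have hinner := pvInnerA n a ha (n + 1 - (a + 1)).toNat (a + 1) c le_rfl (by omega)
      have h2 : a + 1 - 1 = a := by ring
      rw [h2] at hinner
      rw [hinner, IH (a + 1) _ (by omega) (by omega)]
      ring
    · rw [PySem.List.pyRange_one_eq_nil (by omega), Finset.Ico_eq_empty (by omega)]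
      simp

-- B-side: the while loop yields the least lo ≥ 0 with T(lo) ≥ t
theorem pvAdv (t : Int) :
    ∀ (k : Nat) (lo : Int), (t - lo).toNat ≤ k → 0 ≤ lo →
      (∀ i', 0 ≤ i' → i' < lo → pvT i' < t) →
      0 ≤ A321440_adv t lo ∧ t ≤ pvT (A321440_adv t lo) ∧
        (∀ i', 0 ≤ i' → i' < A321440_adv t lo → pvT i' < t) := by
  intro k
  induction k with
  | zero =>
    intro lo hk hlo hinv
    have hstop : ¬ pvT lo < t := by
      have h : lo ≤ pvT lo := pvT_ge_self lo
      omega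
    rw [A321440_adv, if_neg hstop]
    exact ⟨hlo, by omega, hinv⟩
  | succ k IH =>
    intro lo hk hlo hinv
    by_cases hgo : pvT lo < t
    · rw [A321440_adv, if_pos hgo]
      have hdec : (t - (lo + 1)).toNat ≤ k := by
        have h : lo ≤ pvT lo := pvT_ge_self lo
        omega
      exact IH (lo + 1) hdec (by omega)
        (fun i' h0 hl => by
          rcases lt_or_eq_of_le (by omega : i' ≤ lo) with h | h
          · exact hinv i' h0 h
          · rw [h]; exact hgo)
    · rw [A321440_adv, if_neg hgo]
      exact ⟨hlo, by omega, hinv⟩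

-- B-side: one row of the j-loop counts pvQ on [0, j)
theorem pvRowB (n j lo' : Int) (hlo : 0 ≤ lo')
    (hge : pvT j - n ≤ pvT lo')
    (hinv : ∀ i', 0 ≤ i' → i' < lo' → pvT i' < pvT j - n) :
    ((Finset.Ico lo' j).filter (fun i => j ∣ (pvT i + n - pvT j))).card =
      ((Finset.Ico 0 j).filter (fun i => pvQ n i j)).card := by
  congr 1
  ext x
  simp only [Finset.mem_filter, Finset.mem_Ico]
  constructor
  · rintro ⟨⟨h1, h2⟩, hD⟩
    have hK : pvT j - n ≤ pvT x := le_trans hge (pvT_mono lo' x hlo h1)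
    exact ⟨⟨by omega, h2⟩, by omega, hD⟩
  · rintro ⟨⟨h1, h2⟩, hK, hD⟩
    refine ⟨⟨?_, h2⟩, hD⟩
    by_contra hxl
    have := hinv x h1 (by omega)
    omega

-- B-side: the outer fold with its (count, lo) state
theorem pvOuterB (n : Int) :
    ∀ (k : Nat) (a lo c : Int), (n + 1 - a).toNat ≤ k → 1 ≤ a → 0 ≤ lo →
      (∀ i', 0 ≤ i' → i' < lo → pvT i' < pvT a - n) →
      ((PySem.List.pyRange a (n + 1) 1).foldl
        (fun (s : Int × Int) j =>
          let t := PySem.Int.floordiv (j * (j + 1)) 2 - n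
          let lo := A321440_adv t s.2
          let c := (PySem.List.pyRange lo j 1).foldl
            (fun c i =>
              if PySem.Int.mod (PySem.Int.floordiv (i * (i + 1)) 2 + n
                  - PySem.Int.floordiv (j * (j + 1)) 2) j == 0
              then c + 1 else c) s.1
          (c, lo)) (c, lo)).1 =
      c + ∑ j ∈ Finset.Ico a (n + 1),
            (((Finset.Ico 0 j).filter (fun i => pvQ n i j)).card : Int) := by
  intro k
  induction k with
  | zero =>
    intro a lo c hk ha hlo hinv
    rw [PySem.List.pyRange_one_eq_nil (by omega), Finset.Ico_eq_empty (by omega)]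
    simp
  | succ k IH =>
    intro a lo c hk ha hlo hinv
    by_cases han : a < n + 1
    · rw [PySem.List.pyRange_one_cons han, List.foldl_cons, pvSumSplit _ a (n + 1) han]
      obtain ⟨hlo', hge', hinv'⟩ :=
        pvAdv (pvT a - n) (pvT a - n - lo).toNat lo le_rfl hlo hinv
      set lo' := A321440_adv (pvT a - n) lo with hlodef
      have hcnt : (PySem.List.pyRange lo' a 1).foldl
          (fun c i =>
            if PySem.Int.mod (pvT i + n - pvT a) a == 0
            then c + 1 else c) c
          = c + (((Finset.Ico 0 a).filter (fun i => pvQ n i a)).card : Int) := by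
        rw [pvFoldCount (fun i => PySem.Int.mod (pvT i + n - pvT a) a == 0)
            (PySem.List.pyRange lo' a 1) c]
        have hpb : (fun i => PySem.Int.mod (pvT i + n - pvT a) a == 0)
            = (fun i => decide (a ∣ (pvT i + n - pvT a))) := by
          funext i
          rw [Bool.eq_iff_iff, beq_iff_eq, PySem.Int.mod_eq_zero_iff_dvd,
              decide_eq_true_eq]
        rw [hpb, pvCountP_range (fun i => a ∣ (pvT i + n - pvT a)) (a - lo').toNat lo' a le_rfl,
            pvRowB n a lo' hlo' hge' hinv']
      have hstate : (let t := PySem.Int.floordiv (a * (a + 1)) 2 - n;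
          let lo2 := A321440_adv t (c, lo).2;
          let c2 := List.foldl
            (fun c i =>
              if PySem.Int.mod (PySem.Int.floordiv (i * (i + 1)) 2 + n
                  - PySem.Int.floordiv (a * (a + 1)) 2) a == 0
              then c + 1 else c) (c, lo).1 (PySem.List.pyRange lo2 a 1);
          (c2, lo2))
          = (c + (((Finset.Ico 0 a).filter (fun i => pvQ n i a)).card : Int), lo') := by
        show ((PySem.List.pyRange lo' a 1).foldl
            (fun c i =>
              if PySem.Int.mod (pvT i + n - pvT a) a == 0
              then c + 1 else c) c, lo')
          = (c + (((Finset.Ico 0 a).filter (fun i => pvQ n i a)).card : Int), lo')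
        rw [hcnt]
      rw [hstate, IH (a + 1) lo' _ (by omega) (by omega) hlo'
            (fun i' h0 hl => lt_of_lt_of_le (hinv' i' h0 hl)
              (by have := pvT_mono a (a + 1) (by omega) (by omega); omega))]
      ring
    · rw [PySem.List.pyRange_one_eq_nil (by omega), Finset.Ico_eq_empty (by omega)]
      simp

-- the exchange of the two summation orders
theorem pvCardConv (s : Finset Int) (P : Int → Prop) [DecidablePred P] :
    (((s.filter P).card : Int)) = ∑ x ∈ s, if P x then (1 : Int) else 0 := by
  rw [Finset.card_filter]
  push_cast
  exact Finset.sum_congr rfl (fun x _ => by split_ifs <;> simp)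

theorem pvExchange (n : Int) :
    (∑ i ∈ Finset.Ico (0:ℤ) n, (((Finset.Ioc i n).filter (fun j => pvQ n i j)).card : Int))
  = (∑ j ∈ Finset.Ico (1:ℤ) (n + 1),
      (((Finset.Ico (0:ℤ) j).filter (fun i => pvQ n i j)).card : Int)) := by
  have hIdx : Finset.Ico (1:ℤ) (n + 1) = Finset.Ioc (0:ℤ) n := by
    ext x
    simp only [Finset.mem_Ico, Finset.mem_Ioc]
    omega
  rw [hIdx]
  have hA : ∀ i ∈ Finset.Ico (0:ℤ) n,
      (((Finset.Ioc i n).filter (fun j => pvQ n i j)).card : Int)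
        = (((Finset.Ioc (0:ℤ) n).filter (fun j => i < j ∧ pvQ n i j)).card : Int) := by
    intro i hi
    rw [Finset.mem_Ico] at hi
    congr 2
    ext x
    simp only [Finset.mem_filter, Finset.mem_Ioc]
    constructor
    · rintro ⟨⟨h1, h2⟩, hq⟩
      exact ⟨⟨by omega, h2⟩, h1, hq⟩
    · rintro ⟨⟨-, h2⟩, h3, hq⟩
      exact ⟨⟨h3, h2⟩, hq⟩
  have hB : ∀ j ∈ Finset.Ioc (0:ℤ) n,
      (((Finset.Ico (0:ℤ) j).filter (fun i => pvQ n i j)).card : Int)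
        = (((Finset.Ico (0:ℤ) n).filter (fun i => i < j ∧ pvQ n i j)).card : Int) := by
    intro j hj
    rw [Finset.mem_Ioc] at hj
    congr 2
    ext x
    simp only [Finset.mem_filter, Finset.mem_Ico]
    constructor
    · rintro ⟨⟨h1, h2⟩, hq⟩
      exact ⟨⟨h1, by omega⟩, h2, hq⟩
    · rintro ⟨⟨h1, -⟩, h2, hq⟩
      exact ⟨⟨h1, h2⟩, hq⟩
  rw [Finset.sum_congr rfl hA, Finset.sum_congr rfl hB]
  have hcast : ∀ (i : Int), ∀ s : Finset Int,
      (((s.filter (fun j => i < j ∧ pvQ n i j)).card : Int))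
        = ∑ x ∈ s, if i < x ∧ pvQ n i x then (1 : Int) else 0 :=
    fun i s => pvCardConv s _
  calc (∑ i ∈ Finset.Ico (0:ℤ) n,
          (((Finset.Ioc (0:ℤ) n).filter (fun j => i < j ∧ pvQ n i j)).card : Int))
      = ∑ i ∈ Finset.Ico (0:ℤ) n, ∑ j ∈ Finset.Ioc (0:ℤ) n,
          if i < j ∧ pvQ n i j then (1 : Int) else 0 :=
        Finset.sum_congr rfl (fun i _ => hcast i _)
    _ = ∑ j ∈ Finset.Ioc (0:ℤ) n, ∑ i ∈ Finset.Ico (0:ℤ) n,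
          if i < j ∧ pvQ n i j then (1 : Int) else 0 := Finset.sum_comm
    _ = ∑ j ∈ Finset.Ioc (0:ℤ) n,
          (((Finset.Ico (0:ℤ) n).filter (fun i => i < j ∧ pvQ n i j)).card : Int) :=
        Finset.sum_congr rfl (fun j _ => (pvCardConv _ _).symm)

-- ===== VERDICT (by name: the statement is the Claim_ definition above) =====
theorem A321440_spec : Claim_equal_A321440 := by
  intro n _
  unfold Spec_A321440 A321440 A321440_alt
  by_cases h0 : n = 0
  · simp [h0]
  · have hne : ¬ ((n == 0) = true) := by simpa using h0
    rw [if_neg hne, if_neg hne]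
    by_cases hn : 0 < n
    · rw [pvOuterA n (n - 0).toNat 0 0 le_rfl le_rfl,
          pvOuterB n (n + 1 - 1).toNat 1 0 0 le_rfl le_rfl le_rfl
            (fun i' h0' hl => by omega),
          pvExchange n]
    · rw [PySem.List.pyRange_one_eq_nil (by omega : n ≤ 0),
          PySem.List.pyRange_one_eq_nil (by omega : n + 1 ≤ 1)]
      simp
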